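-- pv_equiv track=rewrite | github.com/4a7/calq | main.py | deotraa10
-- ===== SOURCE A (Python) =====
-- posiciones_en_alfa={'A': 1, 'C': 3, 'B': 2, 'E': 5, 'D': 4, 'G': 7, 'F': 6, 'I': 9, 'H': 8, 'K': 11, 'J': 10, 'M': 13, 'L': 12, 'O': 15, 'N': 14, 'Q': 17, 'P': 16, 'S': 19, 'R': 18, 'U': 21, 'T': 20, 'W': 23, 'V': 22, 'Y': 25, 'X': 24, 'Z': 26}
--
-- def deotraa10(tira,fuente):
--     tira=tira.upper()
--     lista=[]
--     check=1
--     tira=tira+"$"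
--     for i in range(len(tira)-1):
--
--         if  tira[i+1]=="(" and tira[i].isalpha():
--             num=""
--             for j in range(i+2,len(tira)-1):
--
--                 if tira[j].isdigit():
--                     num=num+tira[j]
--                 else:
--                     break
--             num=int(num)
--             lista.append([tira[i],num])
--             check=0
--         elif tira[i]==")":
--             check=1
--         elif tira[i+1]==")" or tira[i]=="(" or check==0:
--             pass
--         elif tira[i]=="$":
--             pass
--
--         else:
--             lista.append([tira[i],0])
--
--     resultado=0
--
--     lista.reverse()
--     for i in range(len(lista)):
--         if lista[i][0].isalpha():
--             j=lista[i][0]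
--
--             w=((lista[i][1])*26)+9+posiciones_en_alfa[j]
--             w=w*(int(fuente)**i)
--         else:
--             w=(int(lista[i][0]))*(int(fuente)**i)
--         resultado=resultado+w
--     resultado=str(resultado)
--
--     return resultado
-- ===== SOURCE B (Python) =====
-- posiciones_en_alfa={'A': 1, 'C': 3, 'B': 2, 'E': 5, 'D': 4, 'G': 7, 'F': 6, 'I': 9, 'H': 8, 'K': 11, 'J': 10, 'M': 13, 'L': 12, 'O': 15, 'N': 14, 'Q': 17, 'P': 16, 'S': 19, 'R': 18, 'U': 21, 'T': 20, 'W': 23, 'V': 22, 'Y': 25, 'X': 24, 'Z': 26}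
--
-- def deotraa10(tira, fuente):
--     # single fused pass: Horner evaluation while scanning; no list, no reverse, no powers
--     t = tira.upper()
--     n = len(t)
--     f = int(fuente)
--     res = 0
--     skipping = False
--     for i in range(n):
--         c = t[i]
--         nxt = t[i + 1] if i + 1 < n else ""
--         if c.isalpha() and nxt == "(":
--             num = ""
--             j = i + 2
--             while j < n and t[j].isdigit():
--                 num = num + t[j]
--                 j += 1
--             res = res * f + int(num) * 26 + 9 + posiciones_en_alfa[c]
--             skipping = True
--         elif c == ")":
--             skipping = False
--         elif nxt == ")" or c == "(" or skipping or c == "$":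
--             pass
--         else:
--             if c.isalpha():
--                 res = res * f + 9 + posiciones_en_alfa[c]
--             else:
--                 res = res * f + int(c)
--     return str(res)
-- ===== Notes on version B (the rewrite author's own statement) =====
-- stated objective: faster
-- what changed: B fuses parsing and evaluation into one forward pass that never builds the token list, never reverses it and never computes a power: it keeps a running Horner accumulator (res = res*fuente + value) plus the same skip flag, whereas A first builds the list, reverses it, and recomputes fuente**i for every element.
import Mathlib
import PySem

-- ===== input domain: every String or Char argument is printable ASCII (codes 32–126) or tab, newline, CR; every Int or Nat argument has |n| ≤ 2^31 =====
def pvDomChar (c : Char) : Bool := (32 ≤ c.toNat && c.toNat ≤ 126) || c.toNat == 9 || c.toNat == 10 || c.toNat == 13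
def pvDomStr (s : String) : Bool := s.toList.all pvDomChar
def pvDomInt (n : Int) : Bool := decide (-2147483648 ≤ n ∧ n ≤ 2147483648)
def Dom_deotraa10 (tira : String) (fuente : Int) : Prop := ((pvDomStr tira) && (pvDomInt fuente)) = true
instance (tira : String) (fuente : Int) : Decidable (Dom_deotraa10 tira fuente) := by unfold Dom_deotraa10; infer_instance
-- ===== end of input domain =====

-- B fuses A's parse + reverse + power loop into ONE forward Horner pass (no list, no reverse, no powers); same return value on Pre_.

-- shared module constant: posiciones_en_alfa (the Python dict literal, insertion order kept)
def posAlfa : PySem.Dict Char Int := PySem.Dict.ofList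
  [('A', 1), ('C', 3), ('B', 2), ('E', 5), ('D', 4), ('G', 7), ('F', 6), ('I', 9), ('H', 8),
   ('K', 11), ('J', 10), ('M', 13), ('L', 12), ('O', 15), ('N', 14), ('Q', 17), ('P', 16),
   ('S', 19), ('R', 18), ('U', 21), ('T', 20), ('W', 23), ('V', 22), ('Y', 25), ('X', 24), ('Z', 26)]

-- ===== PORT A =====
-- A's inner 'for j in range(i+2, len(tira)-1): if tira[j].isdigit(): num=num+tira[j] else: break'
def pvScanDigitsA (tl : List Char) (j stop : Nat) : List Char :=
  if h : j < stop then
    if PySem.Chars.isdigit (tl.getD j ' ') then tl.getD j ' ' :: pvScanDigitsA tl (j + 1) stop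
    else []
  else []
termination_by stop - j

def deotraa10 (tira : String) (fuente : Int) : String :=
  let t := (PySem.Str.upper tira).toList          -- tira = tira.upper()
  let tl := t ++ ['$']                            -- tira = tira + "$"
  -- for i in range(len(tira)-1): state (lista, check); check starts at 1
  let st := (List.range (tl.length - 1)).foldl (fun (st : List (Char × Int) × Int) i =>
      let lista := st.1
      let check := st.2
      if tl.getD (i + 1) ' ' = '(' ∧ PySem.Chars.isalpha (tl.getD i ' ') then
        -- int(num): ValueError (empty num) excluded by Pre_; port uses getD 0 there
        let num := (PySem.Int.ofChars? (pvScanDigitsA tl (i + 2) (tl.length - 1))).getD 0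
        (lista ++ [(tl.getD i ' ', num)], 0)
      else if tl.getD i ' ' = ')' then (lista, 1)
      else if tl.getD (i + 1) ' ' = ')' ∨ tl.getD i ' ' = '(' ∨ check = 0 then st
      else if tl.getD i ' ' = '$' then st
      else (lista ++ [(tl.getD i ' ', 0)], check)) ([], 1)
  let lista := st.1.reverse                       -- lista.reverse()
  let resultado := (List.range lista.length).foldl (fun r i =>
      let e := lista.getD i (' ', 0)
      let w := if PySem.Chars.isalpha e.1 then
          (e.2 * 26 + 9 + ((PySem.Dict.get? posAlfa e.1).getD 0)) * fuente ^ i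
          -- posiciones_en_alfa[j]: key always present (uppercased ASCII letter), KeyError impossible on Dom
        else ((PySem.Int.ofChars? [e.1]).getD 0) * fuente ^ i
          -- int(lista[i][0]): ValueError excluded by Pre_
      r + w) 0
  PySem.Int.toStr resultado                       -- str(resultado)

-- ===== PORT B =====
-- B's inner 'while j < n and t[j].isdigit(): num = num + t[j]; j += 1'
def pvScanDigitsB (t : List Char) (j stop : Nat) : List Char :=
  if h : j < stop then
    if PySem.Chars.isdigit (t.getD j ' ') then t.getD j ' ' :: pvScanDigitsB t (j + 1) stop
    else []
  else []
termination_by stop - j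

def deotraa10_alt (tira : String) (fuente : Int) : String :=
  let t := (PySem.Str.upper tira).toList
  let n := t.length
  let st := (List.range n).foldl (fun (st : Int × Bool) i =>
      let res := st.1
      let skipping := st.2
      let c := t.getD i ' '
      let nxt : Option Char := if i + 1 < n then some (t.getD (i + 1) ' ') else none
      if PySem.Chars.isalpha c ∧ nxt = some '(' then
        let num := (PySem.Int.ofChars? (pvScanDigitsB t (i + 2) n)).getD 0   -- int(num); getD 0 outside Pre_
        (res * fuente + num * 26 + 9 + ((PySem.Dict.get? posAlfa c).getD 0), true)
      else if c = ')' then (res, false)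
      else if nxt = some ')' ∨ c = '(' ∨ skipping = true ∨ c = '$' then st
      else if PySem.Chars.isalpha c then (res * fuente + 9 + ((PySem.Dict.get? posAlfa c).getD 0), skipping)
      else (res * fuente + ((PySem.Int.ofChars? [c]).getD 0), skipping)) (0, false)
  PySem.Int.toStr st.1

-- ===== PRECONDITION & SPEC =====
-- positions where A's first branch fires: a letter immediately followed by '('
def pvAlphaParen (t : List Char) (i : Nat) : Prop :=
  PySem.Chars.isalpha (t.getD i ' ') = true ∧ i + 1 < t.length ∧ t.getD (i + 1) ' ' = '('

-- check == 0 when position i is processed: some earlier letter-'(' with no ')' strictly between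
def pvCheckZero (t : List Char) (i : Nat) : Prop :=
  ∃ k, k < i ∧ pvAlphaParen t k ∧ ∀ m, m < i → k < m → t.getD m ' ' ≠ ')'

-- position i reaches A's final 'else' (and is appended with weight char int value)
def pvElseAppends (t : List Char) (i : Nat) : Prop :=
  ¬ pvAlphaParen t i ∧ t.getD i ' ' ≠ ')' ∧ ¬ (i + 1 < t.length ∧ t.getD (i + 1) ' ' = ')') ∧
    t.getD i ' ' ≠ '(' ∧ t.getD i ' ' ≠ '$' ∧ ¬ pvCheckZero t i

-- Pre_ holds exactly where Python A returns: every 'X(' is followed by a digit (else int('') raises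
-- ValueError) and every character appended by the final else is a digit or a letter (else int(c) raises).
def Pre_deotraa10 (tira : String) (fuente : Int) : Prop :=
  (∀ i, i < (PySem.Str.upper tira).toList.length →
      pvAlphaParen (PySem.Str.upper tira).toList i →
      (i + 2 < (PySem.Str.upper tira).toList.length ∧
        PySem.Chars.isdigit ((PySem.Str.upper tira).toList.getD (i + 2) ' ') = true)) ∧
  (∀ i, i < (PySem.Str.upper tira).toList.length →
      pvElseAppends (PySem.Str.upper tira).toList i →
      (PySem.Chars.isdigit ((PySem.Str.upper tira).toList.getD i ' ') = true ∨
        PySem.Chars.isalpha ((PySem.Str.upper tira).toList.getD i ' ') = true))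

instance (tira : String) (fuente : Int) : Decidable (Pre_deotraa10 tira fuente) := by
  unfold Pre_deotraa10 pvElseAppends pvCheckZero pvAlphaParen; infer_instance

def pvWitness_deotraa10 : String × Int := ("a(2)b3", 10)

def Spec_deotraa10 (tira : String) (fuente : Int) (out : String) : Prop := out = deotraa10_alt tira fuente
instance (tira : String) (fuente : Int) (out : String) : Decidable (Spec_deotraa10 tira fuente out) := by unfold Spec_deotraa10; infer_instance

-- ===== CLAIM (what is proved, stated in full; the proofs are below) =====
def Claim_equal_deotraa10 : Prop := ∀ (tira : String) (fuente : Int), Dom_deotraa10 tira fuente → Pre_deotraa10 tira fuente → Spec_deotraa10 tira fuente (deotraa10 tira fuente)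

-- ===== LEMMAS AND PROOFS =====

def pvVal (e : Char × Int) : Int :=
  if PySem.Chars.isalpha e.1 then e.2 * 26 + 9 + ((PySem.Dict.get? posAlfa e.1).getD 0)
  else (PySem.Int.ofChars? [e.1]).getD 0

def pvHorner (f : Int) (vs : List Int) : Int := vs.foldl (fun r v => r * f + v) 0

lemma pvHorner_foldl (f : Int) (vs : List Int) (r : Int) :
    vs.foldl (fun a v => a * f + v) r = r * f ^ vs.length + vs.foldl (fun a v => a * f + v) 0 := by
  induction vs generalizing r with
  | nil => simp
  | cons v vs ih =>
    simp only [List.foldl_cons, List.length_cons]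
    rw [ih (r * f + v), ih (0 * f + v)]
    ring

lemma pvHorner_append (f : Int) (vs : List Int) (v : Int) :
    pvHorner f (vs ++ [v]) = pvHorner f vs * f + v := by
  simp [pvHorner, List.foldl_append]

lemma pvPhase2 (f : Int) (l : List (Char × Int)) :
    (List.range l.length).foldl (fun r i => r + pvVal (l.getD i (' ', 0)) * f ^ i) 0
      = pvHorner f (l.reverse.map pvVal) := by
  induction l using List.reverseRecOn with
  | nil => simp [pvHorner]
  | append_singleton l e ih =>
    rw [List.length_append, List.length_singleton, List.range_succ, List.foldl_append]
    have hcong : (List.range l.length).foldl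
        (fun r i => r + pvVal ((l ++ [e]).getD i (' ', 0)) * f ^ i) 0
        = (List.range l.length).foldl (fun r i => r + pvVal (l.getD i (' ', 0)) * f ^ i) 0 := by
      apply PySem.List.foldl_congr_mem
      intro acc x hx
      rw [List.getD_append _ _ _ _ (List.mem_range.mp hx)]
    have hgetlast : (l ++ [e]).getD l.length (' ', 0) = e := by
      rw [List.getD_append_right _ _ _ _ (le_refl _)]
      simp
    rw [List.foldl_cons, List.foldl_nil, hcong, ih, hgetlast, List.reverse_append,
      List.reverse_singleton, List.singleton_append, List.map_cons]
    show _ = List.foldl (fun r v => r * f + v) 0 (pvVal e :: List.map pvVal l.reverse)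
    rw [List.foldl_cons, pvHorner_foldl]
    simp [pvHorner]
    ring

lemma pvScan_eq (t : List Char) : ∀ j, pvScanDigitsA (t ++ ['$']) j t.length = pvScanDigitsB t j t.length := by
  intro j
  induction hk : t.length - j using Nat.strong_induction_on generalizing j with
  | _ k ih =>
    unfold pvScanDigitsA pvScanDigitsB
    by_cases hj : j < t.length
    · rw [dif_pos hj, dif_pos hj, List.getD_append _ _ _ _ hj]
      split
      · rw [ih (t.length - (j + 1)) (by omega) (j + 1) rfl]
      · rfl
    · rw [dif_neg hj, dif_neg hj]

def pvStepB (t : List Char) (f : Int) (st : Int × Bool) (i : Nat) : Int × Bool :=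
  let n := t.length
  let res := st.1
  let skipping := st.2
  let c := t.getD i ' '
  let nxt : Option Char := if i + 1 < n then some (t.getD (i + 1) ' ') else none
  if PySem.Chars.isalpha c ∧ nxt = some '(' then
    let num := (PySem.Int.ofChars? (pvScanDigitsB t (i + 2) n)).getD 0
    (res * f + num * 26 + 9 + ((PySem.Dict.get? posAlfa c).getD 0), true)
  else if c = ')' then (res, false)
  else if nxt = some ')' ∨ c = '(' ∨ skipping = true ∨ c = '$' then st
  else if PySem.Chars.isalpha c then (res * f + 9 + ((PySem.Dict.get? posAlfa c).getD 0), skipping)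
  else (res * f + ((PySem.Int.ofChars? [c]).getD 0), skipping)

def pvStepA (t : List Char) (st : List (Char × Int) × Int) (i : Nat) : List (Char × Int) × Int :=
  let tl := t ++ ['$']
  let lista := st.1
  let check := st.2
  if tl.getD (i + 1) ' ' = '(' ∧ PySem.Chars.isalpha (tl.getD i ' ') then
    let num := (PySem.Int.ofChars? (pvScanDigitsA tl (i + 2) (tl.length - 1))).getD 0
    (lista ++ [(tl.getD i ' ', num)], 0)
  else if tl.getD i ' ' = ')' then (lista, 1)
  else if tl.getD (i + 1) ' ' = ')' ∨ tl.getD i ' ' = '(' ∨ check = 0 then st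
  else if tl.getD i ' ' = '$' then st
  else (lista ++ [(tl.getD i ' ', 0)], check)

lemma pvStep (t : List Char) (f : Int) (i : Nat) (hi : i < t.length)
    (lista : List (Char × Int)) (check res : Int) (skip : Bool)
    (hres : res = pvHorner f (lista.map pvVal)) (hsk : skip = true ↔ check = 0) :
    (pvStepB t f (res, skip) i).1 = pvHorner f (((pvStepA t (lista, check) i).1).map pvVal)
      ∧ ((pvStepB t f (res, skip) i).2 = true ↔ (pvStepA t (lista, check) i).2 = 0) := by
  have hgi : (t ++ ['$']).getD i ' ' = t.getD i ' ' := List.getD_append _ _ _ _ hi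
  have hlen : (t ++ ['$']).length - 1 = t.length := by simp
  have hscan : pvScanDigitsA (t ++ ['$']) (i + 2) ((t ++ ['$']).length - 1)
      = pvScanDigitsB t (i + 2) t.length := by rw [hlen]; exact pvScan_eq t (i + 2)
  simp only [pvStepA, pvStepB, hgi, hscan]
  by_cases h1 : i + 1 < t.length
  · have hg1 : (t ++ ['$']).getD (i + 1) ' ' = t.getD (i + 1) ' ' := List.getD_append _ _ _ _ h1
    rw [hg1, if_pos h1]
    split_ifs <;> (simp_all [pvHorner_append, pvVal]; try ring)
  · have hi1 : i + 1 = t.length := by omega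
    have hg1 : (t ++ ['$']).getD (i + 1) ' ' = '$' := by
      rw [List.getD_append_right _ _ _ _ (le_of_eq hi1.symm)]
      simp [hi1]
    rw [hg1, if_neg h1]
    split_ifs <;> (simp_all [pvHorner_append, pvVal]; try ring)

lemma pvLoop (t : List Char) (f : Int) :
    ∀ (is : List Nat) (lista : List (Char × Int)) (check res : Int) (skip : Bool),
    (∀ i ∈ is, i < t.length) →
    res = pvHorner f (lista.map pvVal) → (skip = true ↔ check = 0) →
    (is.foldl (pvStepB t f) (res, skip)).1
      = pvHorner f (((is.foldl (pvStepA t) (lista, check)).1).map pvVal) := by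
  intro is
  induction is with
  | nil => intro lista check res skip _ hres _; simpa using hres
  | cons i is ih =>
    intro lista check res skip hmem hres hsk
    simp only [List.foldl_cons]
    obtain ⟨h1, h2⟩ := pvStep t f i (hmem i (by simp)) lista check res skip hres hsk
    have := ih (pvStepA t (lista, check) i).1 (pvStepA t (lista, check) i).2
      (pvStepB t f (res, skip) i).1 (pvStepB t f (res, skip) i).2
      (fun j hj => hmem j (by simp [hj])) h1 h2
    simpa using this

lemma pvPhase2' (f : Int) (l : List (Char × Int)) :
    (List.range l.length).foldl (fun r i =>
      let e := l.getD i (' ', 0)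
      let w := if PySem.Chars.isalpha e.1 then
          (e.2 * 26 + 9 + ((PySem.Dict.get? posAlfa e.1).getD 0)) * f ^ i
        else ((PySem.Int.ofChars? [e.1]).getD 0) * f ^ i
      r + w) 0 = pvHorner f (l.reverse.map pvVal) := by
  rw [← pvPhase2]
  apply PySem.List.foldl_congr_mem
  intro acc x _
  simp only [pvVal, ite_mul]

-- ===== VERDICT (by name: the statement is the Claim_ definition above) =====
theorem deotraa10_spec : Claim_equal_deotraa10 := by
  intro tira fuente _ _
  show deotraa10 tira fuente = deotraa10_alt tira fuente
  have hA : deotraa10 tira fuente = PySem.Int.toStr (pvHorner fuente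
      ((((List.range (((PySem.Str.upper tira).toList ++ ['$']).length - 1)).foldl
        (pvStepA (PySem.Str.upper tira).toList) ([], 1)).1.reverse.reverse).map pvVal)) :=
    congrArg PySem.Int.toStr (pvPhase2' fuente _)
  have hB : deotraa10_alt tira fuente = PySem.Int.toStr
      (((List.range (PySem.Str.upper tira).toList.length).foldl
        (pvStepB (PySem.Str.upper tira).toList fuente) (0, false)).1) := rfl
  have hlen : ((PySem.Str.upper tira).toList ++ ['$']).length - 1
      = (PySem.Str.upper tira).toList.length := by simp
  rw [hA, hB, List.reverse_reverse, hlen]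
  exact (congrArg PySem.Int.toStr ((pvLoop (PySem.Str.upper tira).toList fuente
    (List.range (PySem.Str.upper tira).toList.length) [] 1 0 false
    (fun i h => List.mem_range.mp h) (by simp [pvHorner]) (by simp)))).symm
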